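-- pv_equiv track=rewrite | github.com/xinge-ji/Datus-agent | datus/utils/ast_analyzer.py | _collect_paren_positions
-- ===== SOURCE A (Python) =====
-- from typing import Any, Dict, List, Optional
--
-- def _collect_paren_positions(sql: str) -> tuple[List[int], List[int]]:
--     """收集引号与行注释外的括号位置，用于平衡计算。"""
--     opens: List[int] = []
--     closes: List[int] = []
--     in_single = False
--     in_double = False
--     in_line_comment = False
--     i = 0
--     length = len(sql)
--
--     while i < length:
--         ch = sql[i]
--
--         if in_line_comment:
--             if ch == "\n":
--                 in_line_comment = False
--             i += 1
--             continue
--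
--         if not in_single and not in_double and ch == "-" and i + 1 < length and sql[i + 1] == "-":
--             in_line_comment = True
--             i += 2
--             continue
--
--         if ch == "'" and not in_double:
--             if in_single and i + 1 < length and sql[i + 1] == "'":
--                 i += 2
--                 continue
--             in_single = not in_single
--             i += 1
--             continue
--
--         if ch == '"' and not in_single:
--             if in_double and i + 1 < length and sql[i + 1] == '"':
--                 i += 2
--                 continue
--             in_double = not in_double
--             i += 1
--             continue
--
--         if in_single or in_double:
--             i += 1
--             continue
--
--         if ch == "(":
--             opens.append(i)
--         elif ch == ")":
--             closes.append(i)
--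
--         i += 1
--
--     return opens, closes
-- ===== SOURCE B (Python) =====
-- def _skip_quoted(sql, i, q, n):
--     """Return the index just past the closing quote q (doubled-quote escapes stay inside)."""
--     while i < n:
--         if sql[i] == q:
--             if i + 1 < n and sql[i + 1] == q:
--                 i += 2
--             else:
--                 return i + 1
--         else:
--             i += 1
--     return n
--
--
-- def _collect_paren_positions(sql):
--     """Token-skipping scanner: jump over whole strings/comments instead of tracking flags."""
--     opens = []
--     closes = []
--     n = len(sql)
--     i = 0
--     while i < n:
--         ch = sql[i]
--         if ch == "-" and i + 1 < n and sql[i + 1] == "-":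
--             j = sql.find("\n", i)
--             i = n if j == -1 else j + 1
--         elif ch == "'" or ch == '"':
--             i = _skip_quoted(sql, i + 1, ch, n)
--         else:
--             if ch == "(":
--                 opens.append(i)
--             elif ch == ")":
--                 closes.append(i)
--             i += 1
--     return opens, closes
-- ===== Notes on version B (the rewrite author's own statement) =====
-- stated objective: alternative
-- what changed: Replaced the per-character scanner with three boolean state flags by a token-skipping scanner: whole quoted strings are consumed by a dedicated quote-skipping helper and line comments are jumped over with str.find, so the loop keeps no mode state at all.
import Mathlib
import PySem

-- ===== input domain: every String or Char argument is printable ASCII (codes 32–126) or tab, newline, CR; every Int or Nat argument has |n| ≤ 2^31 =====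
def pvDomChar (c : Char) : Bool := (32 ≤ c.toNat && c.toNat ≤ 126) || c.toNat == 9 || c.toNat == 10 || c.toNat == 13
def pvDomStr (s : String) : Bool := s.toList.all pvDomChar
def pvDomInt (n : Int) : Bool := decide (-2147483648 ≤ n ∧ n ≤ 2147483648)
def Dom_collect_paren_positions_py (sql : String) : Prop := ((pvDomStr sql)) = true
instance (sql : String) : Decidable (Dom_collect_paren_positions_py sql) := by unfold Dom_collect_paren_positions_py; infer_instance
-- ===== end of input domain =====

-- B is an 'alternative': a token-skipping scanner (jump over whole strings/comments) instead of A's per-character boolean state machine; same O(n) cost, equal return value on every input.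
-- Both ports carry an explicit fuel argument (started at the string length) that only makes the index loops total; it never changes a result.

-- ===== PORT A =====
-- literal port of A's while-loop with in_single/in_double/in_line_comment flags
def goA (fuel : Nat) (cs : List Char) (n i : Nat) (inS inD inC : Bool)
    (opens closes : List Int) : List Int × List Int :=
  match fuel with
  | 0 => (opens, closes)
  | fuel + 1 =>
    if i < n then
      if inC then
        if cs.getD i ' ' = '\n' then goA fuel cs n (i+1) inS inD false opens closes
        else goA fuel cs n (i+1) inS inD true opens closes
      else if inS = false ∧ inD = false ∧ cs.getD i ' ' = '-' ∧ i + 1 < n ∧ cs.getD (i+1) ' ' = '-' then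
        goA fuel cs n (i+2) inS inD true opens closes
      else if cs.getD i ' ' = '\'' ∧ inD = false then
        if inS = true ∧ i + 1 < n ∧ cs.getD (i+1) ' ' = '\'' then
          goA fuel cs n (i+2) inS inD inC opens closes
        else goA fuel cs n (i+1) (!inS) inD inC opens closes
      else if cs.getD i ' ' = '"' ∧ inS = false then
        if inD = true ∧ i + 1 < n ∧ cs.getD (i+1) ' ' = '"' then
          goA fuel cs n (i+2) inS inD inC opens closes
        else goA fuel cs n (i+1) inS (!inD) inC opens closes
      else if inS = true ∨ inD = true then
        goA fuel cs n (i+1) inS inD inC opens closes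
      else if cs.getD i ' ' = '(' then
        goA fuel cs n (i+1) inS inD inC (opens ++ [(i : Int)]) closes
      else if cs.getD i ' ' = ')' then
        goA fuel cs n (i+1) inS inD inC opens (closes ++ [(i : Int)])
      else goA fuel cs n (i+1) inS inD inC opens closes
    else (opens, closes)

def collect_paren_positions_py (sql : String) : List Int × List Int :=
  goA sql.toList.length sql.toList sql.toList.length 0 false false false [] []

-- ===== PORT B =====
-- port of Source B's _skip_quoted
def skipQuoted (fuel : Nat) (cs : List Char) (i : Nat) (q : Char) (n : Nat) : Nat :=
  match fuel with
  | 0 => n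
  | fuel + 1 =>
    if i < n then
      if cs.getD i ' ' = q then
        if i + 1 < n ∧ cs.getD (i+1) ' ' = q then skipQuoted fuel cs (i+2) q n
        else i + 1
      else skipQuoted fuel cs (i+1) q n
    else n

-- port of sql.find("\n", i): first newline at position ≥ i (none = -1)
def findNl (fuel : Nat) (cs : List Char) (n i : Nat) : Option Nat :=
  match fuel with
  | 0 => none
  | fuel + 1 =>
    if i < n then
      if cs.getD i ' ' = '\n' then some i else findNl fuel cs n (i+1)
    else none

-- i = n if j == -1 else j + 1  (the index after the comment)
def nlJump (cs : List Char) (n i : Nat) : Nat :=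
  match findNl n cs n i with
  | none => n
  | some j => j + 1

-- literal port of Source B's token-skipping outer loop
def goB (fuel : Nat) (cs : List Char) (n i : Nat) (opens closes : List Int) : List Int × List Int :=
  match fuel with
  | 0 => (opens, closes)
  | fuel + 1 =>
    if i < n then
      if cs.getD i ' ' = '-' ∧ i + 1 < n ∧ cs.getD (i+1) ' ' = '-' then
        goB fuel cs n (nlJump cs n i) opens closes
      else if cs.getD i ' ' = '\'' ∨ cs.getD i ' ' = '"' then
        goB fuel cs n (skipQuoted n cs (i+1) (cs.getD i ' ') n) opens closes
      else if cs.getD i ' ' = '(' then goB fuel cs n (i+1) (opens ++ [(i : Int)]) closes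
      else if cs.getD i ' ' = ')' then goB fuel cs n (i+1) opens (closes ++ [(i : Int)])
      else goB fuel cs n (i+1) opens closes
    else (opens, closes)

def collect_paren_positions_py_alt (sql : String) : List Int × List Int :=
  goB sql.toList.length sql.toList sql.toList.length 0 [] []

-- ===== PRECONDITION & SPEC =====
def Spec_collect_paren_positions_py (sql : String) (out : List Int × List Int) : Prop := out = collect_paren_positions_py_alt sql
instance (sql : String) (out : List Int × List Int) : Decidable (Spec_collect_paren_positions_py sql out) := by unfold Spec_collect_paren_positions_py; infer_instance

-- ===== CLAIM (what is proved, stated in full; the proofs are below) =====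
def Claim_equal_collect_paren_positions_py : Prop := ∀ (sql : String), Dom_collect_paren_positions_py sql → Spec_collect_paren_positions_py sql (collect_paren_positions_py sql)

-- ===== LEMMAS AND PROOFS =====

lemma goA_exit (f : Nat) (cs : List Char) (n i : Nat) (inS inD inC : Bool)
    (o c : List Int) (h : ¬ i < n) : goA f cs n i inS inD inC o c = (o, c) := by
  cases f with
  | zero => rfl
  | succ f => rw [goA, if_neg h]

lemma goB_exit (f : Nat) (cs : List Char) (n i : Nat) (o c : List Int)
    (h : ¬ i < n) : goB f cs n i o c = (o, c) := by
  cases f with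
  | zero => rfl
  | succ f => rw [goB, if_neg h]

lemma skip_exit (f : Nat) (cs : List Char) (i : Nat) (q : Char) (n : Nat)
    (h : ¬ i < n) : skipQuoted f cs i q n = n := by
  cases f with
  | zero => rfl
  | succ f => rw [skipQuoted, if_neg h]

lemma findNl_exit (f : Nat) (cs : List Char) (n i : Nat)
    (h : ¬ i < n) : findNl f cs n i = none := by
  cases f with
  | zero => rfl
  | succ f => rw [findNl, if_neg h]

lemma findNl_ge (f : Nat) (cs : List Char) (n : Nat) :
    ∀ i j, findNl f cs n i = some j → i ≤ j := by
  induction f with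
  | zero => intro i j hj; simp [findNl] at hj
  | succ f ih =>
    intro i j hj
    rw [findNl] at hj
    by_cases h : i < n
    · rw [if_pos h] at hj
      by_cases hnl : cs.getD i ' ' = '\n'
      · rw [if_pos hnl] at hj; injection hj with hj'; omega
      · rw [if_neg hnl] at hj; have := ih (i+1) j hj; omega
    · rw [if_neg h] at hj; exact absurd hj (by simp)

lemma skipQuoted_ge (cs : List Char) (q : Char) (n : Nat) :
    ∀ f i, min i n ≤ skipQuoted f cs i q n := by
  intro f
  induction f with
  | zero => intro i; simp [skipQuoted]
  | succ f ih =>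
    intro i
    rw [skipQuoted]
    by_cases h : i < n
    · rw [if_pos h]
      by_cases hq : cs.getD i ' ' = q
      · rw [if_pos hq]
        by_cases hesc : i + 1 < n ∧ cs.getD (i+1) ' ' = q
        · rw [if_pos hesc]; have := ih (i+2); omega
        · rw [if_neg hesc]; omega
      · rw [if_neg hq]; have := ih (i+1); omega
    · rw [if_neg h]; omega

lemma nlJump_ge (cs : List Char) (n i : Nat) (h : i ≤ n) : i ≤ nlJump cs n i := by
  unfold nlJump
  cases hf : findNl n cs n i with
  | none => exact h
  | some j => exact Nat.le_succ_of_le (findNl_ge n cs n i j hf)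

-- fuel irrelevance: any fuel ≥ n - i gives the same value
lemma findNl_congr (cs : List Char) (n : Nat) :
    ∀ f1 f2 i, n - i ≤ f1 → n - i ≤ f2 → findNl f1 cs n i = findNl f2 cs n i := by
  intro f1
  induction f1 with
  | zero =>
    intro f2 i h1 h2
    have h : ¬ i < n := by omega
    rw [findNl_exit _ _ _ _ h, findNl_exit _ _ _ _ h]
  | succ f1 ih =>
    intro f2 i h1 h2
    by_cases h : i < n
    · cases f2 with
      | zero => omega
      | succ f2 =>
        rw [findNl, findNl, if_pos h, if_pos h]
        by_cases hnl : cs.getD i ' ' = '\n'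
        · rw [if_pos hnl, if_pos hnl]
        · rw [if_neg hnl, if_neg hnl]
          exact ih f2 (i+1) (by omega) (by omega)
    · rw [findNl_exit _ _ _ _ h, findNl_exit _ _ _ _ h]

lemma skip_congr (cs : List Char) (q : Char) (n : Nat) :
    ∀ f1 f2 i, n - i ≤ f1 → n - i ≤ f2 →
      skipQuoted f1 cs i q n = skipQuoted f2 cs i q n := by
  intro f1
  induction f1 with
  | zero =>
    intro f2 i h1 h2
    have h : ¬ i < n := by omega
    rw [skip_exit _ _ _ _ _ h, skip_exit _ _ _ _ _ h]
  | succ f1 ih =>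
    intro f2 i h1 h2
    by_cases h : i < n
    · cases f2 with
      | zero => omega
      | succ f2 =>
        rw [skipQuoted, skipQuoted, if_pos h, if_pos h]
        by_cases hq : cs.getD i ' ' = q
        · rw [if_pos hq, if_pos hq]
          by_cases hesc : i + 1 < n ∧ cs.getD (i+1) ' ' = q
          · rw [if_pos hesc, if_pos hesc]
            exact ih f2 (i+2) (by omega) (by omega)
          · rw [if_neg hesc, if_neg hesc]
        · rw [if_neg hq, if_neg hq]
          exact ih f2 (i+1) (by omega) (by omega)
    · rw [skip_exit _ _ _ _ _ h, skip_exit _ _ _ _ _ h]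

lemma goA_congr (cs : List Char) (n : Nat) :
    ∀ f1 f2 i inS inD inC o c, n - i ≤ f1 → n - i ≤ f2 →
      goA f1 cs n i inS inD inC o c = goA f2 cs n i inS inD inC o c := by
  intro f1
  induction f1 with
  | zero =>
    intro f2 i inS inD inC o c h1 h2
    have h : ¬ i < n := by omega
    rw [goA_exit _ _ _ _ _ _ _ _ _ h, goA_exit _ _ _ _ _ _ _ _ _ h]
  | succ f1 ih =>
    intro f2 i inS inD inC o c h1 h2
    by_cases h : i < n
    · cases f2 with
      | zero => omega
      | succ f2 =>
        rw [goA, goA, if_pos h, if_pos h]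
        split_ifs <;>
          first
            | exact ih f2 (i+1) _ _ _ _ _ (by omega) (by omega)
            | exact ih f2 (i+2) _ _ _ _ _ (by omega) (by omega)
    · rw [goA_exit _ _ _ _ _ _ _ _ _ h, goA_exit _ _ _ _ _ _ _ _ _ h]

-- one-step unfoldings of findNl / skipQuoted under a sufficient-fuel hypothesis
lemma findNl_eq_some (cs : List Char) (n : Nat) (f i : Nat) (h1 : n - i ≤ f)
    (h : i < n) (hnl : cs.getD i ' ' = '\n') : findNl f cs n i = some i := by
  cases f with
  | zero => omega
  | succ f => rw [findNl, if_pos h, if_pos hnl]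

lemma findNl_shift (cs : List Char) (n : Nat) (f f' i : Nat) (h1 : n - i ≤ f)
    (h2 : n - (i+1) ≤ f') (h : i < n) (hnl : ¬ cs.getD i ' ' = '\n') :
    findNl f cs n i = findNl f' cs n (i+1) := by
  cases f with
  | zero => omega
  | succ f =>
    rw [findNl, if_pos h, if_neg hnl]
    exact findNl_congr cs n f f' (i+1) (by omega) h2

lemma skip_eq_of_esc (cs : List Char) (q : Char) (n : Nat) (f f' i : Nat)
    (h1 : n - i ≤ f) (h2 : n - (i+2) ≤ f') (h : i < n)
    (hq : cs.getD i ' ' = q) (hesc : i + 1 < n ∧ cs.getD (i+1) ' ' = q) :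
    skipQuoted f cs i q n = skipQuoted f' cs (i+2) q n := by
  cases f with
  | zero => omega
  | succ f =>
    rw [skipQuoted, if_pos h, if_pos hq, if_pos hesc]
    exact skip_congr cs q n f f' (i+2) (by omega) h2

lemma skip_eq_close (cs : List Char) (q : Char) (n : Nat) (f i : Nat)
    (h1 : n - i ≤ f) (h : i < n) (hq : cs.getD i ' ' = q)
    (hesc : ¬ (i + 1 < n ∧ cs.getD (i+1) ' ' = q)) :
    skipQuoted f cs i q n = i + 1 := by
  cases f with
  | zero => omega
  | succ f => rw [skipQuoted, if_pos h, if_pos hq, if_neg hesc]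

lemma skip_eq_of_ne (cs : List Char) (q : Char) (n : Nat) (f f' i : Nat)
    (h1 : n - i ≤ f) (h2 : n - (i+1) ≤ f') (h : i < n)
    (hq : ¬ cs.getD i ' ' = q) :
    skipQuoted f cs i q n = skipQuoted f' cs (i+1) q n := by
  cases f with
  | zero => omega
  | succ f =>
    rw [skipQuoted, if_pos h, if_neg hq]
    exact skip_congr cs q n f f' (i+1) (by omega) h2

-- inside a line comment, A scans char-by-char to the newline; that equals jumping via nlJump
lemma goA_comment (cs : List Char) (n : Nat) (o c : List Int) :
    ∀ f i, n - i ≤ f →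
      goA f cs n i false false true o c =
        goA n cs n (nlJump cs n i) false false false o c := by
  intro f
  induction f with
  | zero =>
    intro i hif
    have h : ¬ i < n := by omega
    rw [goA_exit _ _ _ _ _ _ _ _ _ h, nlJump, findNl_exit _ _ _ _ h,
      goA_exit _ _ _ _ _ _ _ _ _ (Nat.lt_irrefl n)]
  | succ f ih =>
    intro i hif
    by_cases h : i < n
    · by_cases hnl : cs.getD i ' ' = '\n'
      · rw [nlJump, findNl_eq_some cs n n i (by omega) h hnl]
        conv_lhs => rw [goA]
        simp only [if_pos h, if_true]
        rw [if_pos hnl]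
        exact goA_congr cs n f n (i+1) false false false o c (by omega) (by omega)
      · have hnj : nlJump cs n i = nlJump cs n (i+1) := by
          rw [nlJump, nlJump, findNl_shift cs n n n i (by omega) (by omega) h hnl]
        rw [hnj]
        conv_lhs => rw [goA]
        simp only [if_pos h, if_true]
        rw [if_neg hnl]
        exact ih (i+1) (by omega)
    · rw [goA_exit _ _ _ _ _ _ _ _ _ h, nlJump, findNl_exit _ _ _ _ h,
        goA_exit _ _ _ _ _ _ _ _ _ (Nat.lt_irrefl n)]

-- inside a single-quoted string, A scans char-by-char; that equals skipQuoted
lemma goA_single (cs : List Char) (n : Nat) (o c : List Int) :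
    ∀ f i, n - i ≤ f →
      goA f cs n i true false false o c =
        goA n cs n (skipQuoted n cs i '\'' n) false false false o c := by
  intro f
  induction f with
  | zero =>
    intro i hif
    have h : ¬ i < n := by omega
    rw [goA_exit _ _ _ _ _ _ _ _ _ h, skip_exit _ _ _ _ _ h,
      goA_exit _ _ _ _ _ _ _ _ _ (Nat.lt_irrefl n)]
  | succ f ih =>
    intro i hif
    by_cases h : i < n
    · by_cases hq : cs.getD i ' ' = '\''
      · by_cases hesc : i + 1 < n ∧ cs.getD (i+1) ' ' = '\''
        · rw [skip_eq_of_esc cs '\'' n n n i (by omega) (by omega) h hq hesc]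
          conv_lhs => rw [goA]
          simp only [if_pos h, Bool.false_eq_true, false_and, if_false, and_true, true_and]
          rw [if_pos hq, if_pos hesc]
          exact ih (i+2) (by omega)
        · rw [skip_eq_close cs '\'' n n i (by omega) h hq hesc]
          conv_lhs => rw [goA]
          simp only [if_pos h, Bool.false_eq_true, false_and, if_false, and_true, true_and,
            Bool.not_true]
          rw [if_pos hq, if_neg hesc]
          exact goA_congr cs n f n (i+1) false false false o c (by omega) (by omega)
      · rw [skip_eq_of_ne cs '\'' n n n i (by omega) (by omega) h hq]
        conv_lhs => rw [goA]
        simp only [if_pos h, Bool.false_eq_true, Bool.true_eq_false, false_and, if_false,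
          and_true, and_false, true_or, if_true]
        rw [if_neg hq]
        exact ih (i+1) (by omega)
    · rw [goA_exit _ _ _ _ _ _ _ _ _ h, skip_exit _ _ _ _ _ h,
        goA_exit _ _ _ _ _ _ _ _ _ (Nat.lt_irrefl n)]

-- inside a double-quoted string, A scans char-by-char; that equals skipQuoted
lemma goA_double (cs : List Char) (n : Nat) (o c : List Int) :
    ∀ f i, n - i ≤ f →
      goA f cs n i false true false o c =
        goA n cs n (skipQuoted n cs i '"' n) false false false o c := by
  intro f
  induction f with
  | zero =>
    intro i hif
    have h : ¬ i < n := by omega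
    rw [goA_exit _ _ _ _ _ _ _ _ _ h, skip_exit _ _ _ _ _ h,
      goA_exit _ _ _ _ _ _ _ _ _ (Nat.lt_irrefl n)]
  | succ f ih =>
    intro i hif
    by_cases h : i < n
    · by_cases hq : cs.getD i ' ' = '"'
      · by_cases hesc : i + 1 < n ∧ cs.getD (i+1) ' ' = '"'
        · rw [skip_eq_of_esc cs '"' n n n i (by omega) (by omega) h hq hesc]
          conv_lhs => rw [goA]
          simp only [if_pos h, Bool.true_eq_false, false_and, and_false, if_false, and_true,
            true_and]
          rw [if_pos hq, if_pos hesc]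
          exact ih (i+2) (by omega)
        · rw [skip_eq_close cs '"' n n i (by omega) h hq hesc]
          conv_lhs => rw [goA]
          simp only [if_pos h, Bool.true_eq_false, false_and, and_false, if_false, and_true,
            true_and, Bool.not_true]
          rw [if_pos hq, if_neg hesc]
          exact goA_congr cs n f n (i+1) false false false o c (by omega) (by omega)
      · rw [skip_eq_of_ne cs '"' n n n i (by omega) (by omega) h hq]
        conv_lhs => rw [goA]
        simp only [if_pos h, Bool.true_eq_false, false_and, and_false, if_false, and_true,
          or_true, if_true]
        rw [if_neg hq]
        exact ih (i+1) (by omega)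
    · rw [goA_exit _ _ _ _ _ _ _ _ _ h, skip_exit _ _ _ _ _ h,
        goA_exit _ _ _ _ _ _ _ _ _ (Nat.lt_irrefl n)]

lemma goA_eq_goB (cs : List Char) (n : Nat) :
    ∀ f i o c, n - i ≤ f → goA f cs n i false false false o c = goB f cs n i o c := by
  intro f
  induction f with
  | zero =>
    intro i o c hif
    have h : ¬ i < n := by omega
    rw [goA_exit _ _ _ _ _ _ _ _ _ h, goB_exit _ _ _ _ _ _ h]
  | succ f ih =>
    intro i o c hif
    by_cases h : i < n
    · conv_lhs => rw [goA]
      conv_rhs => rw [goB]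
      simp only [if_pos h, Bool.false_eq_true, false_and, if_false, and_true, true_and,
        or_self, Bool.not_false]
      by_cases hcm : cs.getD i ' ' = '-' ∧ i + 1 < n ∧ cs.getD (i+1) ' ' = '-'
      · have hge : i + 1 ≤ nlJump cs n (i+2) :=
          le_trans (by omega) (nlJump_ge cs n (i+2) (by omega))
        have hnj : nlJump cs n i = nlJump cs n (i+2) := by
          rw [nlJump, nlJump,
            findNl_shift cs n n n i (by omega) (by omega) h (by rw [hcm.1]; decide),
            findNl_shift cs n n n (i+1) (by omega) (by omega) hcm.2.1 (by rw [hcm.2.2]; decide)]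
        rw [if_pos hcm, if_pos hcm, goA_comment cs n o c f (i+2) (by omega), ← hnj,
          goA_congr cs n n f (nlJump cs n i) false false false o c (by omega) (by omega)]
        exact ih (nlJump cs n i) o c (by omega)
      · rw [if_neg hcm, if_neg hcm]
        by_cases hq1 : cs.getD i ' ' = '\''
        · have hge := skipQuoted_ge cs '\'' n n (i+1)
          rw [if_pos hq1, goA_single cs n o c f (i+1) (by omega),
            goA_congr cs n n f (skipQuoted n cs (i+1) '\'' n) false false false o c
              (by omega) (by omega),
            if_pos (Or.inl hq1), hq1]
          exact ih (skipQuoted n cs (i+1) '\'' n) o c (by omega)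
        · by_cases hq2 : cs.getD i ' ' = '"'
          · have hge := skipQuoted_ge cs '"' n n (i+1)
            rw [if_neg hq1, if_pos hq2, goA_double cs n o c f (i+1) (by omega),
              goA_congr cs n n f (skipQuoted n cs (i+1) '"' n) false false false o c
                (by omega) (by omega),
              if_pos (Or.inr hq2), hq2]
            exact ih (skipQuoted n cs (i+1) '"' n) o c (by omega)
          · rw [if_neg hq1, if_neg hq2,
              if_neg (show ¬(cs.getD i ' ' = '\'' ∨ cs.getD i ' ' = '"') from
                fun hc => hc.elim hq1 hq2)]
            by_cases hp : cs.getD i ' ' = '('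
            · rw [if_pos hp, if_pos hp]
              exact ih (i+1) (o ++ [(i : Int)]) c (by omega)
            · rw [if_neg hp, if_neg hp]
              by_cases hp2 : cs.getD i ' ' = ')'
              · rw [if_pos hp2, if_pos hp2]
                exact ih (i+1) o (c ++ [(i : Int)]) (by omega)
              · rw [if_neg hp2, if_neg hp2]
                exact ih (i+1) o c (by omega)
    · rw [goA_exit _ _ _ _ _ _ _ _ _ h, goB_exit _ _ _ _ _ _ h]

-- ===== VERDICT (by name: the statement is the Claim_ definition above) =====
theorem collect_paren_positions_py_spec : Claim_equal_collect_paren_positions_py := by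
  intro sql _
  unfold Spec_collect_paren_positions_py collect_paren_positions_py collect_paren_positions_py_alt
  exact goA_eq_goB sql.toList sql.toList.length sql.toList.length 0 [] [] (by omega)
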